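-- pv_equiv track=rewrite | github.com/Scara-M/ejercicios_aed | ficha15/ejercicio1/modulo.py | busqueda_mas_seco
-- ===== SOURCE A (Python) =====
-- def busqueda_mas_seco(vec):
--     menor = vec[0]
--     pos = 0
--     for i in range(len(vec)):
--         if vec[i] < menor:
--             menor = vec[i]
--             pos = i
--     return menor, pos
-- ===== SOURCE B (Python) =====
-- def busqueda_mas_seco(vec):
--     menor = min(vec)
--     pos = vec.index(menor)
--     return menor, pos
-- ===== Notes on version B (the rewrite author's own statement) =====
-- stated objective: idiomatic
-- what changed: Replaces the manual single-pass tracking loop with two library passes: menor = min(vec) then pos = vec.index(menor); both pick the first occurrence, matching A's strict-< semantics.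
import Mathlib
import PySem

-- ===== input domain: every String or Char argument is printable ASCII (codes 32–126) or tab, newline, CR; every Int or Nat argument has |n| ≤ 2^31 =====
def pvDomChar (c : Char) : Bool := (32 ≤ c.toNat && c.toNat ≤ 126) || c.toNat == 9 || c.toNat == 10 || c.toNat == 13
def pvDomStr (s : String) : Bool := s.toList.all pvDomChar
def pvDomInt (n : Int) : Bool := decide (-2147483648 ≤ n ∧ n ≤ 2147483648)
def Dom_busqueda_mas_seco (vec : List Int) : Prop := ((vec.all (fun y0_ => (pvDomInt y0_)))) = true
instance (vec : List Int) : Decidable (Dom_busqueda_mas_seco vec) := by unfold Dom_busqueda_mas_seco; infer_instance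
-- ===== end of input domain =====

-- B replaces A's single tracking loop by two idiomatic passes (min, then first index of the min); equal return values proved for nonempty input (A raises IndexError on []).

-- ===== PORT A =====
-- literal port of A: menor = vec[0]; pos = 0; for i in range(len(vec)): if vec[i] < menor: update
def busqueda_mas_seco (vec : List Int) : Int × Int :=
  match PySem.List.pyGet? vec 0 with
  | none => (0, 0)  -- IndexError on empty vec; excluded by Pre_
  | some m0 =>
    (PySem.List.pyRange 0 (PySem.List.len vec) 1).foldl
      (fun s i =>
        if PySem.List.pyGetD vec i 0 < s.1 then (PySem.List.pyGetD vec i 0, i) else s)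
      (m0, 0)

-- ===== PORT B =====
-- literal port of B: menor = min(vec); pos = vec.index(menor)
def busqueda_mas_seco_alt (vec : List Int) : Int × Int :=
  match PySem.List.min? vec (fun x => x) with
  | none => (0, 0)  -- ValueError on empty vec; excluded by Pre_
  | some m => (m, (((PySem.List.index? vec m).getD 0 : Nat) : Int))

-- ===== PRECONDITION & SPEC =====
-- Pre_ excludes only the empty list, on which A raises IndexError (and B raises ValueError).
def Pre_busqueda_mas_seco (vec : List Int) : Prop := vec ≠ []
instance (vec : List Int) : Decidable (Pre_busqueda_mas_seco vec) := by unfold Pre_busqueda_mas_seco; infer_instance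
def pvWitness_busqueda_mas_seco : List Int := [3, 1, 2, 1]

def Spec_busqueda_mas_seco (vec : List Int) (out : Int × Int) : Prop := out = busqueda_mas_seco_alt vec
instance (vec : List Int) (out : Int × Int) : Decidable (Spec_busqueda_mas_seco vec out) := by unfold Spec_busqueda_mas_seco; infer_instance

-- ===== CLAIM (what is proved, stated in full; the proofs are below) =====
def Claim_equal_busqueda_mas_seco : Prop := ∀ (vec : List Int), Dom_busqueda_mas_seco vec → Pre_busqueda_mas_seco vec → Spec_busqueda_mas_seco vec (busqueda_mas_seco vec)

-- ===== LEMMAS AND PROOFS =====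

-- running-min facts
theorem foldl_min_le_init (xs : List Int) (m : Int) : xs.foldl min m ≤ m := by
  induction xs generalizing m with
  | nil => simp
  | cons x xs ih => exact le_trans (ih (min m x)) (min_le_left m x)

theorem foldl_min_le_mem (xs : List Int) (m : Int) (y : Int) (hy : y ∈ xs) :
    xs.foldl min m ≤ y := by
  induction xs generalizing m with
  | nil => cases hy
  | cons x xs ih =>
    rcases List.mem_cons.1 hy with h | h
    · subst h; exact le_trans (foldl_min_le_init xs (min m y)) (min_le_right m y)
    · exact ih (min m x) h

theorem foldl_min_of_ge (xs : List Int) (m : Int) (h : ∀ y ∈ xs, m ≤ y) :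
    xs.foldl min m = m := by
  induction xs generalizing m with
  | nil => rfl
  | cons x xs ih =>
    have hx : m ≤ x := h x (List.mem_cons_self)
    simp only [List.foldl_cons, min_eq_left hx]
    exact ih m (fun y hy => h y (List.mem_cons_of_mem _ hy))

theorem foldl_min_mem (xs : List Int) (m : Int) : xs.foldl min m ∈ m :: xs :=
  PySem.List.min?_mem (PySem.List.min?_id_cons m xs)

-- the update step of A's loop, on enumerated pairs
def pvStep (s : Int × Int) (p : Int × Int) : Int × Int :=
  if p.2 < s.1 then (p.2, p.1) else s

-- characterisation of A's loop over a suffix, with arbitrary accumulator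
theorem A_fold (xs : List Int) (s m p : Int) :
    (PySem.List.enumerate xs s).foldl pvStep (m, p) =
      if xs.any (fun y => y < m) then
        (xs.foldl min m,
          s + (((PySem.List.index? xs (xs.foldl min m)).getD 0 : Nat) : Int))
      else (m, p) := by
  induction xs generalizing s m p with
  | nil => simp
  | cons x xs ih =>
    rw [PySem.List.enumerate_cons, List.foldl_cons]
    by_cases hx : x < m
    · have hstep : pvStep (m, p) (s, x) = (x, s) := by simp [pvStep, hx]
      rw [hstep, ih]
      have hcond : ((x :: xs).any fun y => decide (y < m)) = true := by
        simp only [List.any_cons, Bool.or_eq_true, decide_eq_true_eq]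
        exact Or.inl hx
      have hfold : (x :: xs).foldl min m = xs.foldl min x := by
        simp [List.foldl_cons, min_eq_right (le_of_lt hx)]
      by_cases h2 : xs.any (fun y => y < x)
      · rw [if_pos h2, if_pos hcond]
        obtain ⟨y, hy, hylt⟩ := List.any_eq_true.1 h2
        have hlt : xs.foldl min x < x :=
          lt_of_le_of_lt (foldl_min_le_mem xs x y hy) (of_decide_eq_true hylt)
        have hne : x ≠ xs.foldl min x := ne_of_gt hlt
        have hmem : xs.foldl min x ∈ xs := by
          rcases List.mem_cons.1 (foldl_min_mem xs x) with h | h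
          · exact absurd h.symm hne
          · exact h
        obtain ⟨k, hk⟩ := Option.isSome_iff_exists.1
          ((PySem.List.index?_isSome_iff xs _).2 hmem)
        rw [hfold, PySem.List.index?_cons_of_ne xs hne, hk]
        simp only [Option.map_some, Option.getD_some, Prod.mk.injEq]
        refine ⟨?_, ?_⟩ <;> first | trivial | (push_cast; ring)
      · rw [if_neg h2, if_pos hcond]
        have hge : ∀ y ∈ xs, x ≤ y := by
          intro y hy
          by_contra hlt
          exact h2 (List.any_eq_true.2 ⟨y, hy, by simpa using lt_of_not_ge hlt⟩)
        have hx0 : (x :: xs).foldl min m = x := by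
          rw [hfold]; exact foldl_min_of_ge xs x hge
        rw [hx0, PySem.List.index?_cons_self]
        simp
    · have hstep : pvStep (m, p) (s, x) = (m, p) := by simp [pvStep, hx]
      rw [hstep, ih]
      have hfold : (x :: xs).foldl min m = xs.foldl min m := by
        simp [List.foldl_cons, min_eq_left (le_of_not_gt hx)]
      by_cases h2 : xs.any (fun y => y < m)
      · have hcond : ((x :: xs).any fun y => decide (y < m)) = true := by
          simp only [List.any_cons, Bool.or_eq_true]
          exact Or.inr h2
        rw [if_pos h2, if_pos hcond]
        obtain ⟨y, hy, hylt⟩ := List.any_eq_true.1 h2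
        have hlt : xs.foldl min m < m :=
          lt_of_le_of_lt (foldl_min_le_mem xs m y hy) (of_decide_eq_true hylt)
        have hne : x ≠ xs.foldl min m := by
          intro h; rw [← h] at hlt; exact hx hlt
        have hmem : xs.foldl min m ∈ xs := by
          rcases List.mem_cons.1 (foldl_min_mem xs m) with h | h
          · exact absurd h (ne_of_lt hlt)
          · exact h
        obtain ⟨k, hk⟩ := Option.isSome_iff_exists.1
          ((PySem.List.index?_isSome_iff xs _).2 hmem)
        rw [hfold, PySem.List.index?_cons_of_ne xs hne, hk]
        simp only [Option.map_some, Option.getD_some, Prod.mk.injEq]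
        refine ⟨?_, ?_⟩ <;> first | trivial | (push_cast; ring)
      · rw [if_neg h2, if_neg (by simp_all [List.any_cons])]

-- A's fold over pyRange indices is the fold over enumerated pairs
theorem A_eq_enumerate_fold (x : Int) (xs : List Int) :
    busqueda_mas_seco (x :: xs) =
      (PySem.List.enumerate (x :: xs) 0).foldl pvStep (x, 0) := by
  have h0 : PySem.List.pyGet? (x :: xs) (0 : Int) = some x := by
    simp [PySem.List.pyGet?, PySem.List.pyIdx?]
  simp only [busqueda_mas_seco, h0]
  rw [PySem.List.enumerate_eq_map_pyRange (x :: xs) 0, List.foldl_map]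
  rfl

-- ===== VERDICT (by name: the statement is the Claim_ definition above) =====
theorem busqueda_mas_seco_spec : Claim_equal_busqueda_mas_seco := by
  intro vec _ hpre
  unfold Spec_busqueda_mas_seco
  obtain ⟨x, xs, rfl⟩ := List.exists_cons_of_ne_nil hpre
  rw [A_eq_enumerate_fold, A_fold]
  simp only [busqueda_mas_seco_alt, PySem.List.min?_id_cons]
  have hfold : (x :: xs).foldl min x = xs.foldl min x := by
    simp [List.foldl_cons]
  have hany : ((x :: xs).any fun y => y < x) = (xs.any fun y => y < x) := by
    simp [List.any_cons]
  by_cases h2 : xs.any (fun y => y < x)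
  · rw [hany, if_pos h2, hfold]
    simp
  · rw [hany, if_neg h2]
    have hge : ∀ y ∈ xs, x ≤ y := by
      intro y hy
      by_contra hlt
      exact h2 (List.any_eq_true.2 ⟨y, hy, by simpa using lt_of_not_ge hlt⟩)
    have hM : xs.foldl min x = x := foldl_min_of_ge xs x hge
    rw [hM, PySem.List.index?_cons_self]
    simp
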